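-- pv_equiv track=rewrite | github.com/trminhit/Bao_Cao_Ca_Nhan_8Rooks | algorithms/DFS_8Rooks.py | Find_Rooks_DFS
-- ===== SOURCE A (Python) =====
-- def Find_Rooks_DFS(solution):
--     Stack = [[]]
--
--     while Stack:
--         col_select = Stack.pop()
--         if len(col_select) == len(solution):
--             if col_select == solution:
--                 return [(i, col_select[i]) for i in range(len(col_select))]
--             else:
--                 continue
--
--         for col in range(7, -1, -1):
--             if col not in col_select:
--                 Stack.append(col_select + [col])
-- ===== SOURCE B (Python) =====
-- def Find_Rooks_DFS(solution):
--     # Direct validation: A's DFS finds `solution` iff it is a sequence of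
--     # distinct columns in 0..7; then the answer is just the enumerated pairs.
--     if len(set(solution)) == len(solution) and all(0 <= c <= 7 for c in solution):
--         return [(i, c) for i, c in enumerate(solution)]
--     return None
-- ===== Notes on version B (the rewrite author's own statement) =====
-- stated objective: alternative
-- what changed: Replaces A's DFS over partial column selections (stack of candidate lists, compared against solution at the leaves) with a direct validity check (values distinct and in 0..7) followed by enumerate; intended as faster (A explores up to ~10^5 DFS nodes, B is one pass), measured 2.49x at the largest size but not consistently confirmed.
import Mathlib
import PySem

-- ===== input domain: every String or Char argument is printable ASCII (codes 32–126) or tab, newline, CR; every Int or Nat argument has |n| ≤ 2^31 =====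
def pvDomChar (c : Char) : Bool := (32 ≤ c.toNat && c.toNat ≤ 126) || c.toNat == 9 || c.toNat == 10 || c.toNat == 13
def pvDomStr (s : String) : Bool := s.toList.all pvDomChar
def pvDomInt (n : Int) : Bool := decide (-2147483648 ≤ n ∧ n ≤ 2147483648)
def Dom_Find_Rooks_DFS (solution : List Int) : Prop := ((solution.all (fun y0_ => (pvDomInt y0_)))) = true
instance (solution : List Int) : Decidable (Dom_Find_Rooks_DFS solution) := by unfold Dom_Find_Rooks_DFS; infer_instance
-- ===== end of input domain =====

-- B replaces A's stack-based DFS over partial column selections by a direct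
-- validity check (values distinct and in 0..7) followed by enumerate.

-- ===== PORT A =====
-- [(i, col_select[i]) for i in range(len(col_select))]  (index always in range, so pyGetD with default 0 is exact)
def pvEnumA (p : List Int) : List (Int × Int) :=
  (PySem.List.pyRange 0 (p.length : Int) 1).map (fun i => (i, PySem.List.pyGetD p i 0))

-- loop body of 'for col in range(7,-1,-1): if col not in col_select: Stack.append(...)'
-- (stack represented with its top — Python's last element, the one .pop() takes — at the head, so append = cons)
def pvPush (p : List Int) (st : List (List Int)) (col : Int) : List (List Int) :=
  if col ∈ p then st else (p ++ [col]) :: st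

-- the while loop; fuel 9^8 bounds the number of iterations (proved sufficient below)
def pvLoopA (solution : List Int) : Nat → List (List Int) → Option (List (Int × Int))
  | 0, _ => none
  | _ + 1, [] => none
  | fuel + 1, p :: rest =>
    if p.length = solution.length then
      if p = solution then some (pvEnumA p)
      else pvLoopA solution fuel rest
    else
      pvLoopA solution fuel ((PySem.List.pyRange 7 (-1) (-1)).foldl (pvPush p) rest)

def Find_Rooks_DFS (solution : List Int) : Option (List (Int × Int)) :=
  pvLoopA solution 43046721 [[]]

-- ===== PORT B =====
def Find_Rooks_DFS_alt (solution : List Int) : Option (List (Int × Int)) :=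
  if (PySem.Set.ofList solution).length = solution.length
      ∧ solution.all (fun c => decide (0 ≤ c) && decide (c ≤ 7)) = true then
    some (PySem.List.enumerate solution)
  else
    none

-- ===== PRECONDITION & SPEC =====
def Spec_Find_Rooks_DFS (solution : List Int) (out : Option (List (Int × Int))) : Prop := out = Find_Rooks_DFS_alt solution
instance (solution : List Int) (out : Option (List (Int × Int))) : Decidable (Spec_Find_Rooks_DFS solution out) := by unfold Spec_Find_Rooks_DFS; infer_instance

-- ===== CLAIM (what is proved, stated in full; the proofs are below) =====
def Claim_equal_Find_Rooks_DFS : Prop := ∀ (solution : List Int), Dom_Find_Rooks_DFS solution → Spec_Find_Rooks_DFS solution (Find_Rooks_DFS solution)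

-- ===== LEMMAS AND PROOFS =====

-- invariant of every stack entry (and the success condition for `solution` itself)
def pvInv (p : List Int) : Prop := p.Nodup ∧ ∀ x ∈ p, 0 ≤ x ∧ x ≤ 7

-- weight of a stack entry / of a stack: an upper bound on loop iterations it still causes
def pvW (p : List Int) : Nat := 9 ^ (8 - p.length)
def pvWS (S : List (List Int)) : Nat := (S.map pvW).sum

lemma pvCols_eq : PySem.List.pyRange 7 (-1) (-1) = [7, 6, 5, 4, 3, 2, 1, 0] := by decide

lemma pvInv_len_le {p : List Int} (h : pvInv p) : p.length ≤ 8 := by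
  obtain ⟨hn, hb⟩ := h
  have hsub : p.toFinset ⊆ Finset.Icc (0 : Int) 7 := by
    intro x hx
    rw [List.mem_toFinset] at hx
    simpa [Finset.mem_Icc] using hb x hx
  have hcard := Finset.card_le_card hsub
  rw [List.toFinset_card_of_nodup hn] at hcard
  simpa using hcard

lemma pvInv_full {p : List Int} (h : pvInv p) (hl : p.length = 8)
    (c : Int) (h0 : 0 ≤ c) (h7 : c ≤ 7) : c ∈ p := by
  obtain ⟨hn, hb⟩ := h
  have hsub : p.toFinset ⊆ Finset.Icc (0 : Int) 7 := by
    intro x hx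
    rw [List.mem_toFinset] at hx
    simpa [Finset.mem_Icc] using hb x hx
  have hcard : (Finset.Icc (0 : Int) 7).card ≤ p.toFinset.card := by
    rw [List.toFinset_card_of_nodup hn, hl]; simp
  have := Finset.eq_of_subset_of_card_le hsub hcard
  have : c ∈ p.toFinset := by rw [this]; simp [Finset.mem_Icc]; omega
  simpa [List.mem_toFinset] using this

lemma pvMem_foldl_push (p : List Int) (cols : List Int) (rest : List (List Int)) (q : List Int) :
    q ∈ cols.foldl (pvPush p) rest ↔ (∃ c ∈ cols, c ∉ p ∧ q = p ++ [c]) ∨ q ∈ rest := by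
  induction cols generalizing rest with
  | nil => simp
  | cons c cols ih =>
    rw [List.foldl_cons, ih]
    unfold pvPush
    by_cases hc : c ∈ p <;> simp [hc] <;> aesop

lemma pvWS_foldl_push_le (p : List Int) (cols : List Int) (rest : List (List Int)) :
    pvWS (cols.foldl (pvPush p) rest) ≤ cols.length * 9 ^ (8 - (p.length + 1)) + pvWS rest := by
  induction cols generalizing rest with
  | nil => simp
  | cons c cols ih =>
    rw [List.foldl_cons]
    refine le_trans (ih _) ?_
    unfold pvPush
    by_cases hc : c ∈ p <;> simp [hc, pvWS, pvW] <;> ring_nf <;> omega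

lemma pvFoldl_push_all_mem (p : List Int) (cols : List Int) (rest : List (List Int))
    (h : ∀ c ∈ cols, c ∈ p) : cols.foldl (pvPush p) rest = rest := by
  induction cols generalizing rest with
  | nil => rfl
  | cons c cols ih =>
    rw [List.foldl_cons]
    have hc : c ∈ p := h c (by simp)
    rw [pvPush, if_pos hc]
    exact ih _ (fun c hc => h c (by simp [hc]))

lemma pvW_pos (p : List Int) : 1 ≤ pvW p := Nat.one_le_pow _ _ (by norm_num)

-- fuel accounting: popping p and pushing its children shrinks the total weight
lemma pvWS_step {p : List Int} (hp : pvInv p) (rest : List (List Int)) :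
    pvWS ((PySem.List.pyRange 7 (-1) (-1)).foldl (pvPush p) rest) + 1 ≤ pvWS (p :: rest) := by
  have hle := pvInv_len_le hp
  by_cases h8 : p.length = 8
  · rw [pvFoldl_push_all_mem]
    · have := pvW_pos p
      simp [pvWS]; omega
    · intro c hc
      rw [pvCols_eq] at hc
      fin_cases hc <;> exact pvInv_full hp h8 _ (by norm_num) (by norm_num)
  · have hlt : p.length ≤ 7 := by omega
    refine le_trans (Nat.add_le_add_right (pvWS_foldl_push_le p _ rest) 1) ?_
    rw [pvCols_eq]
    have h1 : 1 ≤ 9 ^ (7 - p.length) := Nat.one_le_pow _ _ (by norm_num)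
    have h2 : 8 - p.length = (7 - p.length) + 1 := by omega
    have h3 : 8 - (p.length + 1) = 7 - p.length := by omega
    simp only [pvWS, pvW, List.map_cons, List.sum_cons, h2, h3, pow_succ, List.length_cons,
      List.length_nil]
    omega

lemma pvChild_inv {p : List Int} (hp : pvInv p) {c : Int} (hc0 : 0 ≤ c) (hc7 : c ≤ 7)
    (hcp : c ∉ p) : pvInv (p ++ [c]) := by
  obtain ⟨hn, hb⟩ := hp
  constructor
  · rw [List.nodup_append]
    exact ⟨hn, by simp, fun a ha b hb => by simp at hb; subst hb; exact fun h => hcp (h ▸ ha)⟩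
  · intro x hx
    rcases List.mem_append.mp hx with h | h
    · exact hb x h
    · simp at h; subst h; exact ⟨hc0, hc7⟩

lemma pvFoldl_push_inv {p : List Int} (hp : pvInv p) {rest : List (List Int)}
    (hrest : ∀ q ∈ rest, pvInv q) :
    ∀ q ∈ (PySem.List.pyRange 7 (-1) (-1)).foldl (pvPush p) rest, pvInv q := by
  intro q hq
  rcases (pvMem_foldl_push p _ rest q).mp hq with ⟨c, hc, hcp, rfl⟩ | h
  · rw [pvCols_eq] at hc
    have hc0 : 0 ≤ c ∧ c ≤ 7 := by fin_cases hc <;> norm_num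
    exact pvChild_inv hp hc0.1 hc0.2 hcp
  · exact hrest q h

-- failure: if `solution` is not a distinct 0..7 sequence, the DFS never returns
lemma pvLoop_none (solution : List Int) (hbad : ¬ pvInv solution) :
    ∀ fuel S, (∀ p ∈ S, pvInv p) → pvWS S ≤ fuel → pvLoopA solution fuel S = none := by
  intro fuel
  induction fuel with
  | zero => intro S _ _; rfl
  | succ fuel ih =>
    intro S hS hW
    match S with
    | [] => rfl
    | p :: rest =>
      have hp := hS p (by simp)
      have hrest : ∀ q ∈ rest, pvInv q := fun q hq => hS q (by simp [hq])
      rw [pvLoopA]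
      by_cases hlen : p.length = solution.length
      · rw [if_pos hlen]
        have hne : p ≠ solution := fun h => hbad (h ▸ hp)
        rw [if_neg hne]
        refine ih rest hrest ?_
        have := pvW_pos p
        simp [pvWS] at hW ⊢; omega
      · rw [if_neg hlen]
        refine ih _ (pvFoldl_push_inv hp hrest) ?_
        have := pvWS_step hp rest
        omega

-- success: a stack containing a prefix of a valid `solution` leads to the answer
lemma pvLoop_find (solution : List Int) (hgood : pvInv solution) :
    ∀ fuel S, (∀ p ∈ S, pvInv p) → (∃ p ∈ S, p <+: solution) → pvWS S ≤ fuel →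
      pvLoopA solution fuel S = some (pvEnumA solution) := by
  intro fuel
  induction fuel with
  | zero =>
    intro S _ hex hW
    exfalso
    obtain ⟨p, hp, -⟩ := hex
    have h1 := pvW_pos p
    have : 1 ≤ pvWS S := by
      calc 1 ≤ pvW p := h1
        _ ≤ pvWS S := List.single_le_sum (by simp) _ (List.mem_map_of_mem hp)
    omega
  | succ fuel ih =>
    intro S hS hex hW
    match S with
    | [] => exact absurd hex (by simp)
    | p :: rest =>
      have hp := hS p (by simp)
      have hrest : ∀ q ∈ rest, pvInv q := fun q hq => hS q (by simp [hq])
      rw [pvLoopA]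
      by_cases hlen : p.length = solution.length
      · rw [if_pos hlen]
        by_cases heq : p = solution
        · rw [if_pos heq, heq]
        · rw [if_neg heq]
          obtain ⟨q, hqS, hqpre⟩ := hex
          rcases List.mem_cons.mp hqS with rfl | hqrest
          · exact absurd (List.IsPrefix.eq_of_length hqpre hlen) heq
          · refine ih rest hrest ⟨q, hqrest, hqpre⟩ ?_
            have := pvW_pos p
            simp [pvWS] at hW ⊢; omega
      · rw [if_neg hlen]
        obtain ⟨q, hqS, hqpre⟩ := hex
        have hW' : pvWS ((PySem.List.pyRange 7 (-1) (-1)).foldl (pvPush p) rest) ≤ fuel := by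
          have := pvWS_step hp rest; omega
        rcases List.mem_cons.mp hqS with rfl | hqrest
        · -- extend the prefix q = p by the next column of solution
          have hlt : q.length < solution.length :=
            lt_of_le_of_ne hqpre.length_le hlen
          obtain ⟨t, ht⟩ := hqpre
          have htne : t ≠ [] := by
            intro h; rw [h, List.append_nil] at ht; exact hlen (ht ▸ rfl)
          obtain ⟨c, t', rfl⟩ := List.exists_cons_of_ne_nil htne
          have hcmem : c ∈ solution := by rw [← ht]; simp
          have hc07 := hgood.2 c hcmem
          have hcnot : c ∉ q := by
            have := hgood.1
            rw [← ht] at this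
            rw [List.nodup_append] at this
            exact fun hcq => this.2.2 c hcq c (by simp) rfl
          refine ih _ (pvFoldl_push_inv hp hrest) ⟨q ++ [c], ?_, ?_⟩ hW'
          · refine (pvMem_foldl_push q _ rest _).mpr (Or.inl ⟨c, ?_, hcnot, rfl⟩)
            rw [pvCols_eq]
            have h0 := hc07.1; have h7 := hc07.2
            interval_cases c <;> simp
          · exact ⟨t', by rw [← ht]; simp⟩
        · refine ih _ (pvFoldl_push_inv hp hrest)
            ⟨q, (pvMem_foldl_push p _ rest q).mpr (Or.inr hqrest), hqpre⟩ hW'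

-- B's guard is exactly pvInv
lemma pvOfList_len_iff (xs : List Int) : (PySem.Set.ofList xs).length = xs.length ↔ xs.Nodup := by
  induction xs using List.reverseRecOn with
  | nil => simp
  | append_singleton ys x ih =>
    rw [PySem.Set.ofList_append_singleton, PySem.Set.add_eq_ite]
    by_cases hx : x ∈ PySem.Set.ofList ys
    · rw [if_pos hx]
      have hle := PySem.Set.length_ofList_le (xs := ys)
      have hxy : x ∈ ys := (PySem.Set.mem_ofList ys x).mp hx
      simp only [List.length_append, List.length_cons, List.length_nil]
      constructor
      · omega
      · intro h
        exact absurd rfl ((List.nodup_append.mp h).2.2 x hxy x (by simp))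
    · rw [if_neg hx]
      have hxy : x ∉ ys := fun h => hx ((PySem.Set.mem_ofList ys x).mpr h)
      simp only [List.length_append, List.length_cons, List.length_nil]
      rw [List.nodup_append]
      constructor
      · intro h
        refine ⟨ih.mp (by omega), by simp, ?_⟩
        intro a ha b hb
        simp at hb; subst hb
        exact fun h => hxy (h ▸ ha)
      · rintro ⟨h1, -, -⟩
        have := ih.mpr h1; omega

lemma pvGuard_iff (s : List Int) :
    ((PySem.Set.ofList s).length = s.length
      ∧ s.all (fun c => decide (0 ≤ c) && decide (c ≤ 7)) = true) ↔ pvInv s := by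
  rw [pvOfList_len_iff]
  simp only [List.all_eq_true, Bool.and_eq_true, decide_eq_true_eq]
  unfold pvInv
  constructor
  · intro ⟨h1, h2⟩; exact ⟨h1, fun x hx => h2 x hx⟩
  · intro ⟨h1, h2⟩; exact ⟨h1, fun x hx => h2 x hx⟩

lemma pvEnumA_eq (p : List Int) : pvEnumA p = PySem.List.enumerate p := by
  rw [pvEnumA, PySem.List.enumerate_eq_map_pyRange (d := 0)]
  simp [PySem.List.len_eq]

-- ===== VERDICT (by name: the statement is the Claim_ definition above) =====
theorem Find_Rooks_DFS_spec : Claim_equal_Find_Rooks_DFS := by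
  intro solution _
  unfold Spec_Find_Rooks_DFS
  by_cases h : pvInv solution
  · have halt : Find_Rooks_DFS_alt solution = some (PySem.List.enumerate solution) := by
      unfold Find_Rooks_DFS_alt
      rw [if_pos ((pvGuard_iff solution).mpr h)]
    rw [halt, Find_Rooks_DFS, ← pvEnumA_eq]
    refine pvLoop_find solution h _ [[]] ?_ ⟨[], by simp⟩ ?_
    · intro p hp; simp at hp; subst hp; exact ⟨List.nodup_nil, by simp⟩
    · simp [pvWS, pvW]
  · have halt : Find_Rooks_DFS_alt solution = none := by
      unfold Find_Rooks_DFS_alt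
      rw [if_neg (fun hg => h ((pvGuard_iff solution).mp hg))]
    rw [halt, Find_Rooks_DFS]
    refine pvLoop_none solution h _ [[]] ?_ ?_
    · intro p hp; simp at hp; subst hp; exact ⟨List.nodup_nil, by simp⟩
    · simp [pvWS, pvW]
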